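-- pv_equiv track=rewrite | github.com/Rajbharti06/PulseLock-AI | backend/intelligence/self_learning.py | _extract_new_block_phrases
-- ===== SOURCE A (Python) =====
-- def _extract_new_block_phrases(reasons: list[str], existing_keywords: list[str]) -> list[str]:
--     candidate_phrases = []
--     for reason in reasons:
--         words = reason.lower().split("|")
--         for segment in words:
--             segment = segment.strip()
--             if len(segment) > 10 and segment not in existing_keywords:
--                 if any(kw in segment for kw in ["urgent", "transfer", "send", "immediately", "record"]):
--                     candidate_phrases.append(segment[:60])
--
--     seen = set()
--     unique = []
--     for p in candidate_phrases:
--         key = p[:20]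
--         if key not in seen:
--             seen.add(key)
--             unique.append(p)
--     return unique[:3]
-- ===== SOURCE B (Python) =====
-- def _extract_new_block_phrases(reasons: list[str], existing_keywords: list[str]) -> list[str]:
--     keywords = ["urgent", "transfer", "send", "immediately", "record"]
--
--     def keep(s):
--         return len(s) > 10 and s not in existing_keywords and any(kw in s for kw in keywords)
--
--     cands = [s[:60]
--              for reason in reasons
--              for s in map(str.strip, reason.lower().split("|"))
--              if keep(s)]
--
--     keys = []
--     for p in cands:
--         k = p[:20]
--         if k not in keys:
--             keys.append(k)
--
--     return [next(p for p in cands if p[:20] == k) for k in keys[:3]]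
-- ===== Notes on version B (the rewrite author's own statement) =====
-- stated objective: alternative
-- what changed: Replaced A's seen-set dedup pass that builds the unique phrase list with a key-first strategy: collect candidates by one comprehension, compute the ordered list of distinct 20-char keys, and build the output by looking up, for each of the first three keys, its first matching candidate.
import Mathlib
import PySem

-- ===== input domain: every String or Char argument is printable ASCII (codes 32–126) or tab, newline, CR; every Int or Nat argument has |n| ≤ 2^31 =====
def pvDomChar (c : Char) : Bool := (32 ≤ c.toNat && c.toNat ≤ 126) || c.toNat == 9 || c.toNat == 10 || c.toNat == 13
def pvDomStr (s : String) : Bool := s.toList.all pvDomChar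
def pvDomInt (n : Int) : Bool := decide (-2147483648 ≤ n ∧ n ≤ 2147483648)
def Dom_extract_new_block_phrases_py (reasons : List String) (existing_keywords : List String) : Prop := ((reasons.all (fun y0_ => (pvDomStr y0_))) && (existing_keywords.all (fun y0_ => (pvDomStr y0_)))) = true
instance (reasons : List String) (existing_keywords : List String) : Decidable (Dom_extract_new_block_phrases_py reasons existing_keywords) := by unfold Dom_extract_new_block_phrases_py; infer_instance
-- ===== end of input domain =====

-- B replaces A's seen-set dedup pass by a key-first strategy: build the candidate list in
-- one comprehension, collect the ordered distinct 20-char keys, and produce the output by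
-- looking up, for each of the first three keys, its first matching candidate (objective:
-- alternative, same behaviour).

-- ===== PORT A =====
def pvKeywords : List String := ["urgent", "transfer", "send", "immediately", "record"]

-- segments of one reason: reason.lower().split("|")  (sep "|" is nonempty, so split? is always some)
def pvSegments (reason : String) : List String :=
  (PySem.Str.split? (PySem.Str.lower reason) "|").getD []

-- inner loop of A's first pass over the segments of one reason
def pvCollectSeg (existing_keywords : List String) (words : List String)
    (cand : List String) : List String :=
  match words with
  | [] => cand
  | w :: rest =>
    let segment := PySem.Str.strip w
    let cand' :=
      if PySem.Str.len segment > 10 && !(existing_keywords.contains segment) then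
        if pvKeywords.any (fun kw => PySem.Str.isIn kw segment) then
          cand ++ [PySem.Str.slice segment none (some 60)]
        else cand
      else cand
    pvCollectSeg existing_keywords rest cand'

-- outer loop of A's first pass
def pvCollect (existing_keywords : List String) (reasons : List String)
    (cand : List String) : List String :=
  match reasons with
  | [] => cand
  | r :: rest => pvCollect existing_keywords rest (pvCollectSeg existing_keywords (pvSegments r) cand)

-- A's second pass: seen = set(); unique = []
def pvDedup (ps : List String) (seen : PySem.Set String) (unique : List String) : List String :=
  match ps with
  | [] => unique
  | p :: rest =>
    let key := PySem.Str.slice p none (some 20)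
    if PySem.Set.contains seen key then pvDedup rest seen unique
    else pvDedup rest (PySem.Set.add seen key) (unique ++ [p])

def extract_new_block_phrases_py (reasons : List String) (existing_keywords : List String) : List String :=
  PySem.List.slice (pvDedup (pvCollect existing_keywords reasons []) PySem.Set.empty []) none (some 3)

-- ===== PORT B =====
-- B's segment filter `keep`
def pvKeep (existing_keywords : List String) (s : String) : Bool :=
  PySem.Str.len s > 10 && !(existing_keywords.contains s)
    && pvKeywords.any (fun kw => PySem.Str.isIn kw s)

-- B's candidate comprehension
def pvCands (existing_keywords : List String) (reasons : List String) : List String :=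
  reasons.flatMap (fun reason =>
    (((pvSegments reason).map PySem.Str.strip).filter (pvKeep existing_keywords)).map
      (fun s => PySem.Str.slice s none (some 60)))

-- B's loop collecting the distinct keys in order of first occurrence
def pvKeys : List String → List String → List String
  | [], acc => acc
  | p :: rest, acc =>
    let k := PySem.Str.slice p none (some 20)
    if acc.contains k then pvKeys rest acc else pvKeys rest (acc ++ [k])

def extract_new_block_phrases_py_alt (reasons : List String) (existing_keywords : List String) : List String :=
  let cands := pvCands existing_keywords reasons
  let keys := pvKeys cands []
  -- `next(p for p in cands if p[:20] == k)`: the find? is always some (k comes from cands),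
  -- so the .getD "" default is never used
  (PySem.List.slice keys none (some 3)).map
    (fun k => (cands.find? (fun p => PySem.Str.slice p none (some 20) == k)).getD "")

-- ===== PRECONDITION & SPEC =====
def Spec_extract_new_block_phrases_py (reasons : List String) (existing_keywords : List String) (out : List String) : Prop := out = extract_new_block_phrases_py_alt reasons existing_keywords
instance (reasons : List String) (existing_keywords : List String) (out : List String) : Decidable (Spec_extract_new_block_phrases_py reasons existing_keywords out) := by unfold Spec_extract_new_block_phrases_py; infer_instance

-- ===== CLAIM (what is proved, stated in full; the proofs are below) =====
def Claim_equal_extract_new_block_phrases_py : Prop := ∀ (reasons : List String) (existing_keywords : List String), Dom_extract_new_block_phrases_py reasons existing_keywords → Spec_extract_new_block_phrases_py reasons existing_keywords (extract_new_block_phrases_py reasons existing_keywords)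

-- ===== LEMMAS AND PROOFS =====

-- the 20-char key of a candidate phrase
def pvKeyOf (p : String) : String := PySem.Str.slice p none (some 20)

-- (key, first candidate with that key) pairs, in order of first key occurrence,
-- skipping keys already in `mem` — the common characterisation of both dedup strategies
def pvFresh : List String → (String → Bool) → List (String × String)
  | [], _ => []
  | p :: rest, mem =>
    let k := pvKeyOf p
    if mem k then pvFresh rest mem
    else (k, p) :: pvFresh rest (fun x => mem x || x == k)

theorem pvFresh_congr (ps : List String) (m1 m2 : String → Bool)
    (h : ∀ x, m1 x = m2 x) : pvFresh ps m1 = pvFresh ps m2 := by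
  induction ps generalizing m1 m2 with
  | nil => rfl
  | cons p rest ih =>
    simp only [pvFresh, h]
    split_ifs
    · exact ih _ _ h
    · exact congrArg _ (ih _ _ (fun x => rfl))

theorem pvListContains_append_one (acc : List String) (k x : String) :
    (acc ++ [k]).contains x = (acc.contains x || x == k) := by
  cases hx : (x == k) with
  | false =>
    have hne : x ≠ k := by simpa using hx
    simp [hne]
  | true =>
    have hx' : x = k := by simpa using hx
    subst hx'
    simp

theorem pvSet_contains_add (s : PySem.Set String) (k x : String) :
    PySem.Set.contains (PySem.Set.add s k) x = (PySem.Set.contains s x || x == k) := by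
  simp only [PySem.Set.add]
  split_ifs with h
  · cases hx : (x == k) with
    | false => simp
    | true =>
      have hx' : x = k := by simpa using hx
      subst hx'
      simp only [Bool.or_true]
      exact h
  · cases hx : (x == k) with
    | false =>
      have hne : x ≠ k := by simpa using hx
      simp [PySem.Set.contains, hne]
    | true =>
      have hx' : x = k := by simpa using hx
      subst hx'
      simp [PySem.Set.contains]

theorem pvDedup_eq_fresh (ps : List String) (seen : PySem.Set String) (unique : List String) :
    pvDedup ps seen unique
      = unique ++ (pvFresh ps (fun x => PySem.Set.contains seen x)).map Prod.snd := by
  induction ps generalizing seen unique with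
  | nil => simp [pvDedup, pvFresh]
  | cons p rest ih =>
    simp only [pvDedup, pvFresh, pvKeyOf]
    split_ifs with h
    · simp [ih]
    · rw [ih, pvFresh_congr rest _ _ (fun x => pvSet_contains_add seen _ x)]
      simp

theorem pvKeys_eq_fresh (ps : List String) (acc : List String) :
    pvKeys ps acc = acc ++ (pvFresh ps (fun x => acc.contains x)).map Prod.fst := by
  induction ps generalizing acc with
  | nil => simp [pvKeys, pvFresh]
  | cons p rest ih =>
    simp only [pvKeys, pvFresh, pvKeyOf]
    split_ifs with h
    · simp [ih]
    · rw [ih, pvFresh_congr rest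
        (fun x => (acc ++ [PySem.Str.slice p none (some 20)]).contains x)
        (fun x => acc.contains x || x == PySem.Str.slice p none (some 20))
        (fun x => pvListContains_append_one acc _ x)]
      simp

-- each pvFresh pair (k, p): k is fresh and p is the FIRST element of the scanned list with key k
theorem pvFresh_find (ps : List String) (mem : String → Bool) (k p : String)
    (h : (k, p) ∈ pvFresh ps mem) :
    mem k = false ∧ ps.find? (fun q => pvKeyOf q == k) = some p := by
  induction ps generalizing mem with
  | nil => simp [pvFresh] at h
  | cons q rest ih =>
    simp only [pvFresh] at h
    split_ifs at h with hq
    · obtain ⟨hmk, hfind⟩ := ih _ h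
      have hne : (pvKeyOf q == k) = false := by
        cases he : (pvKeyOf q == k) with
        | false => rfl
        | true =>
          have : pvKeyOf q = k := by simpa using he
          rw [this] at hq; rw [hq] at hmk; cases hmk
      refine ⟨hmk, ?_⟩
      rw [List.find?_cons, hne, hfind]
    · rcases List.mem_cons.mp h with heq | hmem
      · have hk : k = pvKeyOf q := congrArg Prod.fst heq
        have hp : p = q := congrArg Prod.snd heq
        subst hk; subst hp
        refine ⟨by simpa using hq, ?_⟩
        simp
      · obtain ⟨hmk, hfind⟩ := ih _ hmem
        have hk2 : mem k = false ∧ (k == pvKeyOf q) = false := by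
          constructor
          · cases hm : mem k with
            | false => rfl
            | true => rw [Bool.or_eq_false_iff] at hmk; exact absurd hm (by simp [hmk.1])
          · rw [Bool.or_eq_false_iff] at hmk; exact hmk.2
        have hne : (pvKeyOf q == k) = false := by
          cases he : (pvKeyOf q == k) with
          | false => rfl
          | true =>
            have : pvKeyOf q = k := by simpa using he
            rw [this] at hk2
            simpa using hk2.2
        refine ⟨hk2.1, ?_⟩
        rw [List.find?_cons, hne, hfind]

-- B's candidate comprehension per reason equals A's per-segment accumulation
def pvCandOf (existing_keywords : List String) : List String → List String
  | [] => []
  | w :: rest =>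
    let segment := PySem.Str.strip w
    (if PySem.Str.len segment > 10 && !(existing_keywords.contains segment)
        && pvKeywords.any (fun kw => PySem.Str.isIn kw segment) then
      [PySem.Str.slice segment none (some 60)]
    else []) ++ pvCandOf existing_keywords rest

theorem pvCollectSeg_eq (ex words cand : List String) :
    pvCollectSeg ex words cand = cand ++ pvCandOf ex words := by
  induction words generalizing cand with
  | nil => simp [pvCollectSeg, pvCandOf]
  | cons w rest ih =>
    cases h1 : (decide (PySem.Str.len (PySem.Str.strip w) > 10)
        && !(ex.contains (PySem.Str.strip w))) with
    | false =>
      simp only [pvCollectSeg, pvCandOf, h1, Bool.false_and]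
      simp [ih]

    | true =>
      cases h2 : (pvKeywords.any (fun kw => PySem.Str.isIn kw (PySem.Str.strip w))) with
      | false =>
        simp only [pvCollectSeg, pvCandOf, h1, h2, Bool.and_false]
        simp [ih]
      | true =>
        simp only [pvCollectSeg, pvCandOf, h1, h2, Bool.and_true]
        simp [ih]

theorem pvCollect_eq (ex reasons cand : List String) :
    pvCollect ex reasons cand
      = cand ++ reasons.flatMap (fun r => pvCandOf ex (pvSegments r)) := by
  induction reasons generalizing cand with
  | nil => simp [pvCollect]
  | cons r rest ih => simp [pvCollect, ih, pvCollectSeg_eq]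

theorem pvCandOf_eq_filter_map (ex ws : List String) :
    pvCandOf ex ws
      = ((ws.map PySem.Str.strip).filter (pvKeep ex)).map
          (fun s => PySem.Str.slice s none (some 60)) := by
  induction ws with
  | nil => rfl
  | cons w rest ih =>
    simp only [pvCandOf, List.map_cons, List.filter_cons, pvKeep]
    split_ifs with h
    · simp [ih]
    · simp [ih]

theorem pvCands_eq (ex reasons : List String) :
    pvCands ex reasons = reasons.flatMap (fun r => pvCandOf ex (pvSegments r)) := by
  simp [pvCands, pvCandOf_eq_filter_map]

theorem pvSlice3_eq_take (xs : List String) :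
    PySem.List.slice xs none (some 3) = xs.take 3 := by
  simpa using PySem.List.slice_to_natCast (xs := xs) (b := 3)

-- ===== VERDICT (by name: the statement is the Claim_ definition above) =====
theorem extract_new_block_phrases_py_spec : Claim_equal_extract_new_block_phrases_py := by
  intro reasons ex _
  unfold Spec_extract_new_block_phrases_py
  unfold extract_new_block_phrases_py extract_new_block_phrases_py_alt
  simp only [pvCollect_eq, List.nil_append, pvCands_eq, pvSlice3_eq_take]
  set cands := reasons.flatMap (fun r => pvCandOf ex (pvSegments r)) with hc
  rw [pvDedup_eq_fresh, pvKeys_eq_fresh, List.nil_append, List.nil_append]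
  have hmem : (fun x : String => PySem.Set.contains PySem.Set.empty x)
      = (fun x : String => ([] : List String).contains x) := by
    funext x; simp [PySem.Set.contains, PySem.Set.empty]
  rw [hmem]
  set mem0 := fun x : String => ([] : List String).contains x
  rw [← List.map_take, ← List.map_take, List.map_map]
  apply List.map_congr_left
  intro pr hpr
  have hpr' : (pr.1, pr.2) ∈ pvFresh cands mem0 := by
    have := List.mem_of_mem_take hpr
    simpa using this
  have hfind := (pvFresh_find cands mem0 pr.1 pr.2 hpr').2
  simp only [Function.comp]
  rw [show (fun p => PySem.Str.slice p none (some 20) == pr.1)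
      = (fun q => pvKeyOf q == pr.1) from rfl, hfind]
  rfl
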